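-- pv_equiv track=rewrite | github.com/maickrau/rdna_resolution | scripts/extract_loops_seq_ref.py | get_alignment_breakpoint
-- ===== SOURCE A (Python) =====
-- def get_alignment_breakpoint(ref, ref_pos, query):
-- 	dp_matrix = []
-- 	for i in range(0, len(ref)):
-- 		dp_matrix.append([])
-- 		for j in range(0, len(query)):
-- 			dp_matrix[-1].append(0)
-- 	for i in range(0, len(ref)):
-- 		for j in range(0, len(query)):
-- 			min_incoming = len(ref)+len(query)
-- 			if i > 0:
-- 				incoming = dp_matrix[i-1][j]+1
-- 				if incoming < min_incoming: min_incoming = incoming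
-- 			if j > 0:
-- 				incoming = dp_matrix[i][j-1]+1
-- 				if incoming < min_incoming: min_incoming = incoming
-- 			if i > 0 and j > 0:
-- 				match_score = 0 if (ref[i] == query[j] or query[j] == "N") else 1
-- 				incoming = dp_matrix[i-1][j-1] + match_score
-- 				if incoming < min_incoming: min_incoming = incoming
-- 			if min_incoming == len(ref)+len(query):
-- 				assert i == 0 and j == 0
-- 			else:
-- 				dp_matrix[i][j] = min_incoming
-- 	i = len(ref)-1
-- 	j = len(query)-1
-- 	edits = dp_matrix[i][j]
-- 	query_breakpoint = None
-- 	while i != 0 or j != 0: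
-- 		if i == 0:
-- 			j -= 1
-- 			continue
-- 		if j == 0:
-- 			i -= 1
-- 			continue
-- 		if i == ref_pos:
-- 			query_breakpoint = j
-- 		match_score = 0 if (ref[i] == query[j] or query[j] == "N") else 1
-- 		assert dp_matrix[i-1][j-1] >= dp_matrix[i][j]-match_score
-- 		assert dp_matrix[i][j-1] >= dp_matrix[i][j]-1
-- 		assert dp_matrix[i-1][j] >= dp_matrix[i][j]-1
-- 		if dp_matrix[i-1][j-1] == dp_matrix[i][j]-match_score:
-- 			i -= 1
-- 			j -= 1
-- 			continue
-- 		if dp_matrix[i-1][j] == dp_matrix[i][j]-1: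
-- 			i -= 1
-- 			continue
-- 		if dp_matrix[i][j-1] == dp_matrix[i][j]-1:
-- 			j -= 1
-- 			continue
-- 		assert False
-- 	return (query_breakpoint, edits)
-- ===== SOURCE B (Python) =====
-- def get_alignment_breakpoint(ref, ref_pos, query):
-- 	R = len(ref)
-- 	Q = len(query)
-- 	dp = []
-- 	ptr = []  # 0 = diag, 1 = up, 2 = left (traceback priority order)
-- 	for i in range(R):
-- 		dp_row = []
-- 		ptr_row = []
-- 		for j in range(Q):
-- 			if i == 0 and j == 0:
-- 				v, d = 0, 2
-- 			elif i == 0: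
-- 				v, d = dp_row[j-1] + 1, 2
-- 			elif j == 0:
-- 				v, d = dp[i-1][0] + 1, 1
-- 			else:
-- 				ms = 0 if (ref[i] == query[j] or query[j] == "N") else 1
-- 				diag = dp[i-1][j-1] + ms
-- 				up = dp[i-1][j] + 1
-- 				left = dp_row[j-1] + 1
-- 				v = min(diag, up, left)
-- 				d = 0 if diag == v else (1 if up == v else 2)
-- 			dp_row.append(v)
-- 			ptr_row.append(d)
-- 		dp.append(dp_row)
-- 		ptr.append(ptr_row)
-- 	i = R - 1
-- 	j = Q - 1
-- 	edits = dp[i][j]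
-- 	query_breakpoint = None
-- 	while i != 0 or j != 0:
-- 		if i != 0 and j != 0 and i == ref_pos:
-- 			query_breakpoint = j
-- 		d = ptr[i][j]
-- 		if d == 0:
-- 			i -= 1
-- 			j -= 1
-- 		elif d == 1:
-- 			i -= 1
-- 		else:
-- 			j -= 1
-- 	return (query_breakpoint, edits)
-- ===== Notes on version B (the rewrite author's own statement) =====
-- stated objective: alternative
-- what changed: B records a direction pointer (diag/up/left, chosen with the traceback priority) in a second matrix while filling the DP table and does the traceback by following stored pointers, instead of A's sentinel-min fill and a traceback that recomputes and compares neighbouring DP cells at every step.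
import Mathlib
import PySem

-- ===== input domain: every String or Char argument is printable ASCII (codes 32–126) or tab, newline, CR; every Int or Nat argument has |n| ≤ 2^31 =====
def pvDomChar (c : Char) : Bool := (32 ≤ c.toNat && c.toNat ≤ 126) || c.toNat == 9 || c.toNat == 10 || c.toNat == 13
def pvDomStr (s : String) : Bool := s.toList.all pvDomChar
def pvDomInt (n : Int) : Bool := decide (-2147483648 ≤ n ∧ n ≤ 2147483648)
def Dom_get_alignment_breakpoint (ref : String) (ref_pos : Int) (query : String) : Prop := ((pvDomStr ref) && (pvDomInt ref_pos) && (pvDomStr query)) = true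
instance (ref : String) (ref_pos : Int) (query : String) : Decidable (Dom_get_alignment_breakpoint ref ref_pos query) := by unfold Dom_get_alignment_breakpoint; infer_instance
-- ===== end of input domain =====

-- B replaces A's recompute-and-compare traceback by a pointer matrix stored during the fill
-- (same return value; equivalence is about the return value only).

-- ===== PORT A =====

-- match score: 0 if ref[i] == query[j] or query[j] == "N" else 1 (indices always in range where used)
def pvMs (refL qL : List Char) (i j : Nat) : Int :=
  if refL.getD i ' ' = qL.getD j ' ' ∨ qL.getD j ' ' = 'N' then 0 else 1

-- one cell of A's fill: the min_incoming chain starting from the sentinel len(ref)+len(query);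
-- 'if min_incoming == len(ref)+len(query)' leaves the pre-zeroed cell (Python's assert i==0 and j==0 passes there)
def pvCellA (refL qL : List Char) (m : List (List Int)) (row : List Int) (i j : Nat) : Int :=
  let N : Int := (refL.length : Int) + (qL.length : Int)
  let m1 : Int := if 0 < i then
      (let inc := (m.getD (i-1) []).getD j 0 + 1; if inc < N then inc else N) else N
  let m2 : Int := if 0 < j then
      (let inc := row.getD (j-1) 0 + 1; if inc < m1 then inc else m1) else m1
  let m3 : Int := if 0 < i ∧ 0 < j then
      (let inc := (m.getD (i-1) []).getD (j-1) 0 + pvMs refL qL i j; if inc < m2 then inc else m2) else m2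
  if m3 = N then 0 else m3

-- inner j-loop: Python mutates dp_matrix[i][j] left to right, i.e. builds the row
def pvRowA (refL qL : List Char) (m : List (List Int)) (i : Nat) : List Int :=
  (List.range qL.length).foldl (fun row j => row ++ [pvCellA refL qL m row i j]) []

-- outer i-loop
def pvFillA (refL qL : List Char) : List (List Int) :=
  (List.range refL.length).foldl (fun m i => m ++ [pvRowA refL qL m i]) []

-- the while-loop traceback, recomputing match_score and comparing DP cells each step
def pvTbA (refL qL : List Char) (m : List (List Int)) (ref_pos : Int) (i j : Nat) (bp : Option Int) : Option Int :=
  if h0 : i = 0 ∧ j = 0 then bp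
  else if hi : i = 0 then pvTbA refL qL m ref_pos 0 (j-1) bp
  else if hj : j = 0 then pvTbA refL qL m ref_pos (i-1) 0 bp
  else
    let bp' := if (i : Int) = ref_pos then some (j : Int) else bp
    let ms := pvMs refL qL i j
    if (m.getD (i-1) []).getD (j-1) 0 = (m.getD i []).getD j 0 - ms then
      pvTbA refL qL m ref_pos (i-1) (j-1) bp'
    else if (m.getD (i-1) []).getD j 0 = (m.getD i []).getD j 0 - 1 then
      pvTbA refL qL m ref_pos (i-1) j bp'
    else if (m.getD i []).getD (j-1) 0 = (m.getD i []).getD j 0 - 1 then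
      pvTbA refL qL m ref_pos i (j-1) bp'
    else bp'  -- Python 'assert False': unreachable since dp[i][j] is the min of the three candidates
termination_by i + j
decreasing_by all_goals omega

def get_alignment_breakpoint (ref : String) (ref_pos : Int) (query : String) : Option Int × Int :=
  let refL := ref.toList
  let qL := query.toList
  let m := pvFillA refL qL
  let i := refL.length - 1
  let j := qL.length - 1
  let edits := (m.getD i []).getD j 0
  (pvTbA refL qL m ref_pos i j none, edits)

-- ===== PORT B =====

-- one cell of B's fill: (dp value, direction pointer); 0 = diag, 1 = up, 2 = left
def pvCellB (refL qL : List Char) (dp : List (List Int)) (dpRow : List Int) (i j : Nat) : Int × Nat :=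
  if i = 0 ∧ j = 0 then (0, 2)
  else if i = 0 then (dpRow.getD (j-1) 0 + 1, 2)
  else if j = 0 then ((dp.getD (i-1) []).getD 0 0 + 1, 1)
  else
    let ms := pvMs refL qL i j
    let diag := (dp.getD (i-1) []).getD (j-1) 0 + ms
    let up := (dp.getD (i-1) []).getD j 0 + 1
    let left := dpRow.getD (j-1) 0 + 1
    let v := min (min diag up) left
    (v, if diag = v then 0 else if up = v then 1 else 2)

-- B's inner j-loop, building the dp row and the pointer row together
def pvRowB (refL qL : List Char) (dp : List (List Int)) (i : Nat) : List Int × List Nat :=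
  (List.range qL.length).foldl (fun rp j =>
    (rp.1 ++ [(pvCellB refL qL dp rp.1 i j).1], rp.2 ++ [(pvCellB refL qL dp rp.1 i j).2]))
    (([] : List Int), ([] : List Nat))

-- B's outer i-loop, carrying the (dp, ptr) matrices
def pvFillB (refL qL : List Char) : List (List Int) × List (List Nat) :=
  (List.range refL.length).foldl (fun mp i =>
    (mp.1 ++ [(pvRowB refL qL mp.1 i).1], mp.2 ++ [(pvRowB refL qL mp.1 i).2]))
    (([] : List (List Int)), ([] : List (List Nat)))

-- B's pointer-following while loop; the fuel argument only makes it total (the loop takes at most i+j steps)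
def pvTbB (ptr : List (List Nat)) (ref_pos : Int) : Nat → Nat → Nat → Option Int → Option Int
  | 0, _, _, bp => bp
  | f+1, i, j, bp =>
    if i = 0 ∧ j = 0 then bp
    else
      let bp' := if 0 < i ∧ 0 < j ∧ (i : Int) = ref_pos then some (j : Int) else bp
      let d := (ptr.getD i []).getD j 2
      if d = 0 then pvTbB ptr ref_pos f (i-1) (j-1) bp'
      else if d = 1 then pvTbB ptr ref_pos f (i-1) j bp'
      else pvTbB ptr ref_pos f i (j-1) bp'

def get_alignment_breakpoint_alt (ref : String) (ref_pos : Int) (query : String) : Option Int × Int :=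
  let refL := ref.toList
  let qL := query.toList
  let mp := pvFillB refL qL
  let i := refL.length - 1
  let j := qL.length - 1
  let edits := (mp.1.getD i []).getD j 0
  (pvTbB mp.2 ref_pos (i + j + 1) i j none, edits)

-- ===== PRECONDITION & SPEC =====
-- Pre_ excludes only empty ref or empty query, on which Python A raises IndexError (dp_matrix[-1] on an empty list).
def Pre_get_alignment_breakpoint (ref : String) (ref_pos : Int) (query : String) : Prop :=
  ref.toList ≠ [] ∧ query.toList ≠ []
instance (ref : String) (ref_pos : Int) (query : String) : Decidable (Pre_get_alignment_breakpoint ref ref_pos query) := by unfold Pre_get_alignment_breakpoint; infer_instance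

def pvWitness_get_alignment_breakpoint : String × Int × String := ("ACT", 1, "AGT")

def Spec_get_alignment_breakpoint (ref : String) (ref_pos : Int) (query : String) (out : Option Int × Int) : Prop := out = get_alignment_breakpoint_alt ref ref_pos query
instance (ref : String) (ref_pos : Int) (query : String) (out : Option Int × Int) : Decidable (Spec_get_alignment_breakpoint ref ref_pos query out) := by unfold Spec_get_alignment_breakpoint; infer_instance

-- ===== CLAIM (what is proved, stated in full; the proofs are below) =====
def Claim_equal_get_alignment_breakpoint : Prop := ∀ (ref : String) (ref_pos : Int) (query : String), Dom_get_alignment_breakpoint ref ref_pos query → Pre_get_alignment_breakpoint ref ref_pos query → Spec_get_alignment_breakpoint ref ref_pos query (get_alignment_breakpoint ref ref_pos query)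

-- ===== LEMMAS AND PROOFS =====

-- the mathematical DP recurrence both fills compute
def dpf (refL qL : List Char) (i j : Nat) : Int :=
  if h0 : i = 0 ∧ j = 0 then 0
  else if hi : i = 0 then dpf refL qL 0 (j-1) + 1
  else if hj : j = 0 then dpf refL qL (i-1) 0 + 1
  else min (min (dpf refL qL (i-1) j + 1) (dpf refL qL i (j-1) + 1))
           (dpf refL qL (i-1) (j-1) + pvMs refL qL i j)
termination_by i + j
decreasing_by all_goals omega

-- the pointer B stores at (i,j), expressed through dpf
def ptrf (refL qL : List Char) (i j : Nat) : Nat :=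
  if i = 0 then 2
  else if j = 0 then 1
  else if dpf refL qL (i-1) (j-1) + pvMs refL qL i j = dpf refL qL i j then 0
  else if dpf refL qL (i-1) j + 1 = dpf refL qL i j then 1
  else 2

theorem pvMs_cases (refL qL : List Char) (i j : Nat) : pvMs refL qL i j = 0 ∨ pvMs refL qL i j = 1 := by
  unfold pvMs; split <;> simp

theorem dpf_bounds (refL qL : List Char) : ∀ n i j, i + j ≤ n → 0 ≤ dpf refL qL i j ∧ dpf refL qL i j ≤ (i : Int) + (j : Int) := by
  intro n
  induction n with
  | zero =>
    intro i j h
    have hi : i = 0 := by omega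
    have hj : j = 0 := by omega
    subst hi; subst hj
    rw [dpf]; simp
  | succ n ih =>
    intro i j h
    rw [dpf]
    by_cases h0 : i = 0 ∧ j = 0
    · simp [h0]
    · simp only [h0, dif_neg, not_false_iff]
      by_cases hi : i = 0
      · have := ih 0 (j-1) (by omega)
        simp only [hi, dif_pos]
        push_cast
        omega
      · by_cases hj : j = 0
        · have := ih (i-1) 0 (by omega)
          simp only [hi, hj, dif_neg, not_false_iff, dif_pos]
          push_cast
          omega
        · have h1 := ih (i-1) j (by omega)
          have h2 := ih i (j-1) (by omega)
          have h3 := ih (i-1) (j-1) (by omega)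
          have h4 := pvMs_cases refL qL i j
          simp only [hi, hj, dif_neg, not_false_iff]
          push_cast
          omega

-- getD helpers
theorem getD_append_lt {α : Type} (l : List α) (r d : α) (i : Nat) (h : i < l.length) :
    (l ++ [r]).getD i d = l.getD i d := by
  simp [List.getD, List.getElem?_append_left h]

theorem getD_append_len {α : Type} (l : List α) (r d : α) :
    (l ++ [r]).getD l.length d = r := by
  simp [List.getD]

theorem getD_append_len' {α : Type} (l : List α) (r d : α) (i : Nat) (h : i = l.length) :
    (l ++ [r]).getD i d = r := by
  subst h; exact getD_append_len l r d

theorem getD_map_range {α : Type} (g : Nat → α) (k j : Nat) (d : α) (h : j < k) :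
    ((List.range k).map g).getD j d = g j := by
  simp [List.getD, List.getElem?_map, List.getElem?_range h]

theorem foldl_range_succ {α : Type} (f : α → Nat → α) (a : α) (n : Nat) :
    (List.range (n+1)).foldl f a = f ((List.range n).foldl f a) n := by
  rw [List.range_succ, List.foldl_append]; rfl

-- A's cell equals dpf
theorem cellA_spec (refL qL : List Char) (m : List (List Int)) (row : List Int) (i j : Nat)
    (hi : i < refL.length) (hj : j < qL.length)
    (hrow : 0 < j → row.getD (j-1) 0 = dpf refL qL i (j-1))
    (hprev : 0 < i → m.getD (i-1) [] = (List.range qL.length).map (dpf refL qL (i-1))) :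
    pvCellA refL qL m row i j = dpf refL qL i j := by
  rcases Nat.eq_zero_or_pos i with hi0 | hi0 <;>
  rcases Nat.eq_zero_or_pos j with hj0 | hj0
  -- i = 0, j = 0
  · subst hi0; subst hj0; rw [dpf]; simp [pvCellA]
  -- i = 0, 0 < j
  · subst hi0
    have hb2 := dpf_bounds refL qL (0+(j-1)) 0 (j-1) le_rfl
    have hrv := hrow hj0
    have hj0' : ¬ (j = 0) := by omega
    rw [dpf]; unfold pvCellA
    simp only [hj0', and_false, false_and, dite_false, dif_neg, not_false_iff, dite_true, dif_pos,
      Nat.lt_irrefl, if_neg, if_pos hj0, hrv, lt_self_iff_false, false_and, and_true, if_false]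
    rcases pvMs_cases refL qL 0 j with hms | hms <;> split_ifs <;> omega
  -- 0 < i, j = 0
  · subst hj0
    have hb1 := dpf_bounds refL qL ((i-1)+0) (i-1) 0 le_rfl
    have hpm := hprev hi0
    have hi0' : ¬ (i = 0) := by omega
    rw [dpf]; unfold pvCellA
    simp only [hpm, hi0', and_false, false_and, dite_false, dif_neg, not_false_iff, dif_pos,
      if_pos hi0, Nat.lt_irrefl, lt_self_iff_false, and_false, if_false,
      getD_map_range _ _ _ _ (by omega : (0:Nat) < qL.length)]
    rcases pvMs_cases refL qL i 0 with hms | hms <;> split_ifs <;> omega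
  -- 0 < i, 0 < j
  · have hb1 := dpf_bounds refL qL ((i-1)+j) (i-1) j le_rfl
    have hb2 := dpf_bounds refL qL (i+(j-1)) i (j-1) le_rfl
    have hb3 := dpf_bounds refL qL ((i-1)+(j-1)) (i-1) (j-1) le_rfl
    have hpm := hprev hi0
    have hrv := hrow hj0
    have hi0' : ¬ (i = 0) := by omega
    have hj0' : ¬ (j = 0) := by omega
    rw [dpf]; unfold pvCellA
    simp only [hpm, hrv, hi0', hj0', false_and, and_false, dite_false, dif_neg, not_false_iff,
      if_pos hi0, if_pos hj0, if_pos (And.intro hi0 hj0),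
      getD_map_range _ _ _ _ hj, getD_map_range _ _ _ _ (by omega : j - 1 < qL.length)]
    rcases pvMs_cases refL qL i j with hms | hms <;> split_ifs <;> omega

-- B's cell equals (dpf, ptrf)
theorem cellB_spec (refL qL : List Char) (dp : List (List Int)) (dpRow : List Int) (i j : Nat)
    (hi : i < refL.length) (hj : j < qL.length)
    (hrow : 0 < j → dpRow.getD (j-1) 0 = dpf refL qL i (j-1))
    (hprev : 0 < i → dp.getD (i-1) [] = (List.range qL.length).map (dpf refL qL (i-1))) :
    pvCellB refL qL dp dpRow i j = (dpf refL qL i j, ptrf refL qL i j) := by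
  rcases Nat.eq_zero_or_pos i with hi0 | hi0 <;>
  rcases Nat.eq_zero_or_pos j with hj0 | hj0
  -- i = 0, j = 0
  · subst hi0; subst hj0; rw [dpf]; simp [pvCellB, ptrf]
  -- i = 0, 0 < j
  · subst hi0
    have hrv := hrow hj0
    have hj0' : ¬ (j = 0) := by omega
    rw [dpf]; unfold pvCellB ptrf
    simp [List.getD] at hrv
    simp [hj0', hrv]
  -- 0 < i, j = 0
  · subst hj0
    have hpm := hprev hi0
    have hi0' : ¬ (i = 0) := by omega
    rw [dpf]; unfold pvCellB ptrf
    simp only [hpm, hi0', and_false, false_and, dite_false, dif_neg, not_false_iff, dif_pos,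
      if_neg, if_pos, if_true, ite_true, ite_false,
      getD_map_range _ _ _ _ (by omega : (0:Nat) < qL.length)]
  -- 0 < i, 0 < j
  · have hpm := hprev hi0
    have hrv := hrow hj0
    have hi0' : ¬ (i = 0) := by omega
    have hj0' : ¬ (j = 0) := by omega
    have hdpf : dpf refL qL i j
        = min (min (dpf refL qL (i-1) j + 1) (dpf refL qL i (j-1) + 1))
              (dpf refL qL (i-1) (j-1) + pvMs refL qL i j) := by
      rw [dpf]; simp [hi0', hj0']
    unfold pvCellB ptrf
    simp only [hi0', hj0', false_and, and_false, if_false, dite_false, not_false_iff, if_neg,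
      ite_false, hpm, hrv,
      getD_map_range _ _ _ _ hj, getD_map_range _ _ _ _ (by omega : j - 1 < qL.length)]
    have hv : min (min (dpf refL qL (i-1) (j-1) + pvMs refL qL i j) (dpf refL qL (i-1) j + 1))
        (dpf refL qL i (j-1) + 1) = dpf refL qL i j := by omega
    rw [hv]

-- row/fill correctness, A
theorem rowA_spec (refL qL : List Char) (m : List (List Int)) (i : Nat) (hi : i < refL.length)
    (hprev : 0 < i → m.getD (i-1) [] = (List.range qL.length).map (dpf refL qL (i-1))) :
    pvRowA refL qL m i = (List.range qL.length).map (dpf refL qL i) := by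
  unfold pvRowA
  have key : ∀ k, k ≤ qL.length →
      (List.range k).foldl (fun row j => row ++ [pvCellA refL qL m row i j]) [] = (List.range k).map (dpf refL qL i) := by
    intro k
    induction k with
    | zero => intro _; simp
    | succ k ih =>
      intro hk
      rw [foldl_range_succ, ih (by omega), List.range_succ, List.map_append]
      congr 1
      rw [cellA_spec refL qL m _ i k hi (by omega)
        (fun hk0 => getD_map_range _ _ _ _ (by omega)) hprev]
      simp
  exact key qL.length (le_refl _)

theorem fillA_spec (refL qL : List Char) : ∀ n, n ≤ refL.length →
    ((List.range n).foldl (fun m i => m ++ [pvRowA refL qL m i]) []).length = n ∧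
    ∀ i, i < n → ((List.range n).foldl (fun m i => m ++ [pvRowA refL qL m i]) []).getD i [] = (List.range qL.length).map (dpf refL qL i) := by
  intro n
  induction n with
  | zero => intro _; simp
  | succ n ih =>
    intro hn
    obtain ⟨hlen, hget⟩ := ih (by omega)
    rw [foldl_range_succ]
    constructor
    · simp [hlen]
    · intro i hi
      by_cases hin : i < n
      · rw [getD_append_lt _ _ _ _ (by omega), hget i hin]
      · have hieq : i = n := by omega
        subst hieq
        rw [getD_append_len' _ _ _ _ hlen.symm]
        exact rowA_spec refL qL _ i (by omega) (fun h0 => hget (i-1) (by omega))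

-- row/fill correctness, B
theorem rowB_spec (refL qL : List Char) (dp : List (List Int)) (i : Nat) (hi : i < refL.length)
    (hprev : 0 < i → dp.getD (i-1) [] = (List.range qL.length).map (dpf refL qL (i-1))) :
    pvRowB refL qL dp i = ((List.range qL.length).map (dpf refL qL i), (List.range qL.length).map (ptrf refL qL i)) := by
  unfold pvRowB
  have key : ∀ k, k ≤ qL.length →
      (List.range k).foldl (fun rp j =>
        (rp.1 ++ [(pvCellB refL qL dp rp.1 i j).1], rp.2 ++ [(pvCellB refL qL dp rp.1 i j).2]))
        (([] : List Int), ([] : List Nat))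
        = ((List.range k).map (dpf refL qL i), (List.range k).map (ptrf refL qL i)) := by
    intro k
    induction k with
    | zero => intro _; simp
    | succ k ih =>
      intro hk
      rw [foldl_range_succ, ih (by omega)]
      have hc := cellB_spec refL qL dp ((List.range k).map (dpf refL qL i)) i k hi (by omega)
        (fun hk0 => getD_map_range _ _ _ _ (by omega)) hprev
      simp only [hc, List.range_succ, List.map_append, List.map_cons, List.map_nil]
  exact key qL.length (le_refl _)

theorem fillB_len1 (refL qL : List Char) : ∀ n,
    ((List.range n).foldl (fun mp i =>
      (mp.1 ++ [(pvRowB refL qL mp.1 i).1], mp.2 ++ [(pvRowB refL qL mp.1 i).2]))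
      (([] : List (List Int)), ([] : List (List Nat)))).1.length = n := by
  intro n
  induction n with
  | zero => simp
  | succ n ih => rw [foldl_range_succ]; simp [ih]

theorem fillB_len2 (refL qL : List Char) : ∀ n,
    ((List.range n).foldl (fun mp i =>
      (mp.1 ++ [(pvRowB refL qL mp.1 i).1], mp.2 ++ [(pvRowB refL qL mp.1 i).2]))
      (([] : List (List Int)), ([] : List (List Nat)))).2.length = n := by
  intro n
  induction n with
  | zero => simp
  | succ n ih => rw [foldl_range_succ]; simp [ih]

theorem fillB_spec (refL qL : List Char) : ∀ n, n ≤ refL.length →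
    ∀ i, i < n →
      ((List.range n).foldl (fun mp i =>
        (mp.1 ++ [(pvRowB refL qL mp.1 i).1], mp.2 ++ [(pvRowB refL qL mp.1 i).2]))
        (([] : List (List Int)), ([] : List (List Nat)))).1.getD i [] = (List.range qL.length).map (dpf refL qL i) ∧
      ((List.range n).foldl (fun mp i =>
        (mp.1 ++ [(pvRowB refL qL mp.1 i).1], mp.2 ++ [(pvRowB refL qL mp.1 i).2]))
        (([] : List (List Int)), ([] : List (List Nat)))).2.getD i [] = (List.range qL.length).map (ptrf refL qL i) := by
  intro n
  induction n with
  | zero => intro _ i hi; omega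
  | succ n ih =>
    intro hn
    have hget := ih (by omega)
    have hl1 := fillB_len1 refL qL n
    have hl2 := fillB_len2 refL qL n
    have hrow := rowB_spec refL qL
      ((List.range n).foldl (fun mp i =>
        (mp.1 ++ [(pvRowB refL qL mp.1 i).1], mp.2 ++ [(pvRowB refL qL mp.1 i).2]))
        (([] : List (List Int)), ([] : List (List Nat)))).1
      n (by omega) (fun h0 => (hget (n-1) (by omega)).1)
    rw [foldl_range_succ]
    intro i hi
    by_cases hin : i < n
    · constructor
      · rw [getD_append_lt _ _ _ _ (by omega)]
        exact (hget i hin).1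
      · rw [getD_append_lt _ _ _ _ (by omega)]
        exact (hget i hin).2
    · have hieq : i = n := by omega
      subst hieq
      constructor
      · rw [getD_append_len' _ _ _ _ hl1.symm, hrow]
      · rw [getD_append_len' _ _ _ _ hl2.symm, hrow]

-- the traceback equivalence: on a dpf matrix, A's recompute-and-compare steps equal B's pointer steps
theorem tb_eq (refL qL : List Char) (mA : List (List Int)) (ptrB : List (List Nat)) (rp : Int)
    (hA : ∀ i, i < refL.length → mA.getD i [] = (List.range qL.length).map (dpf refL qL i))
    (hB : ∀ i, i < refL.length → ptrB.getD i [] = (List.range qL.length).map (ptrf refL qL i)) :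
    ∀ f i j bp, i + j < f → i < refL.length → j < qL.length →
      pvTbA refL qL mA rp i j bp = pvTbB ptrB rp f i j bp := by
  intro f
  induction f with
  | zero => intro i j bp h; omega
  | succ f ih =>
    intro i j bp hf hi hj
    rw [pvTbA, pvTbB]
    by_cases h0 : i = 0 ∧ j = 0
    · simp [h0]
    · simp only [h0, dif_neg, not_false_iff, if_neg]
      have hptr : (ptrB.getD i []).getD j 2 = ptrf refL qL i j := by
        rw [hB i hi, getD_map_range _ _ _ _ hj]
      by_cases hi0 : i = 0
      · have hj0 : 0 < j := by omega
        have hj0' : ¬ (j = 0) := by omega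
        have hp2 : ptrf refL qL i j = 2 := by unfold ptrf; simp [hi0]
        subst hi0
        rw [hptr, hp2]
        norm_num [hj0']
        exact ih 0 (j-1) bp (by omega) hi (by omega)
      · by_cases hj0 : j = 0
        · have hp1 : ptrf refL qL i j = 1 := by unfold ptrf; simp [hi0, hj0]
          subst hj0
          rw [hptr, hp1]
          norm_num [hi0]
          exact ih (i-1) 0 bp (by omega) (by omega) hj
        · have hiv : 0 < i := by omega
          have hjv : 0 < j := by omega
          simp only [hi0, hj0, dif_neg, not_false_iff]
          have hbp : (if 0 < i ∧ 0 < j ∧ (i : Int) = rp then some (j : Int) else bp)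
              = (if (i : Int) = rp then some (j : Int) else bp) := by
            simp [hiv, hjv]
          have hmd : (mA.getD (i-1) []).getD (j-1) 0 = dpf refL qL (i-1) (j-1) := by
            rw [hA (i-1) (by omega), getD_map_range _ _ _ _ (by omega)]
          have hmu : (mA.getD (i-1) []).getD j 0 = dpf refL qL (i-1) j := by
            rw [hA (i-1) (by omega), getD_map_range _ _ _ _ hj]
          have hml : (mA.getD i []).getD (j-1) 0 = dpf refL qL i (j-1) := by
            rw [hA i hi, getD_map_range _ _ _ _ (by omega)]
          have hmc : (mA.getD i []).getD j 0 = dpf refL qL i j := by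
            rw [hA i hi, getD_map_range _ _ _ _ hj]
          simp only [hptr, hbp, hmd, hmu, hml, hmc]
          unfold ptrf
          simp only [hi0, hj0, if_neg, not_false_iff]
          by_cases hd : dpf refL qL (i-1) (j-1) + pvMs refL qL i j = dpf refL qL i j
          · have hd' : dpf refL qL (i-1) (j-1) = dpf refL qL i j - pvMs refL qL i j := by omega
            simp only [hd, hd', if_pos]
            norm_num
            exact ih (i-1) (j-1) _ (by omega) (by omega) (by omega)
          · have hd' : ¬ (dpf refL qL (i-1) (j-1) = dpf refL qL i j - pvMs refL qL i j) := by omega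
            simp only [hd, hd', if_neg, not_false_iff]
            by_cases hu : dpf refL qL (i-1) j + 1 = dpf refL qL i j
            · have hu' : dpf refL qL (i-1) j = dpf refL qL i j - 1 := by omega
              simp only [hu, hu', if_pos]
              norm_num
              exact ih (i-1) j _ (by omega) (by omega) hj
            · have hu' : ¬ (dpf refL qL (i-1) j = dpf refL qL i j - 1) := by omega
              -- min property: neither diag nor up matches, so the left candidate does
              have hmin : dpf refL qL i j = min (min (dpf refL qL (i-1) j + 1) (dpf refL qL i (j-1) + 1)) (dpf refL qL (i-1) (j-1) + pvMs refL qL i j) := by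
                conv_lhs => rw [dpf]
                simp [h0, hi0, hj0]
              have hl : dpf refL qL i (j-1) = dpf refL qL i j - 1 := by omega
              simp only [hu, hu', if_neg, not_false_iff, hl, if_pos]
              norm_num
              exact ih i (j-1) _ (by omega) hi (by omega)

-- ===== VERDICT (by name: the statement is the Claim_ definition above) =====
theorem get_alignment_breakpoint_spec : Claim_equal_get_alignment_breakpoint := by
  intro ref ref_pos query _ hpre
  unfold Spec_get_alignment_breakpoint
  obtain ⟨href, hq⟩ := hpre
  have hR : 0 < ref.toList.length := List.length_pos_iff.mpr href
  have hQ : 0 < query.toList.length := List.length_pos_iff.mpr hq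
  unfold get_alignment_breakpoint get_alignment_breakpoint_alt
  obtain ⟨hlenA, hgetA⟩ := fillA_spec ref.toList query.toList ref.toList.length (le_refl _)
  have hgetB := fillB_spec ref.toList query.toList ref.toList.length (le_refl _)
  have hA : ∀ i, i < ref.toList.length → (pvFillA ref.toList query.toList).getD i [] = (List.range query.toList.length).map (dpf ref.toList query.toList i) := hgetA
  have hB1 : ∀ i, i < ref.toList.length → (pvFillB ref.toList query.toList).1.getD i [] = (List.range query.toList.length).map (dpf ref.toList query.toList i) := fun i hi => (hgetB i hi).1
  have hB2 : ∀ i, i < ref.toList.length → (pvFillB ref.toList query.toList).2.getD i [] = (List.range query.toList.length).map (ptrf ref.toList query.toList i) := fun i hi => (hgetB i hi).2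
  refine Prod.ext ?_ ?_
  · show pvTbA ref.toList query.toList (pvFillA ref.toList query.toList) ref_pos
        (ref.toList.length - 1) (query.toList.length - 1) none
      = pvTbB (pvFillB ref.toList query.toList).2 ref_pos
        ((ref.toList.length - 1) + (query.toList.length - 1) + 1)
        (ref.toList.length - 1) (query.toList.length - 1) none
    exact tb_eq ref.toList query.toList _ _ ref_pos hA hB2 _ _ _ none (by omega) (by omega) (by omega)
  · show ((pvFillA ref.toList query.toList).getD (ref.toList.length - 1) []).getD (query.toList.length - 1) 0
      = (((pvFillB ref.toList query.toList).1.getD (ref.toList.length - 1) []).getD (query.toList.length - 1) 0)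
    rw [hA _ (by omega), hB1 _ (by omega)]
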